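-- pv_equiv track=rewrite | github.com/saudadez21/novel-downloader | src/novel_downloader/plugins/sites/fanqienovel/parser.py | _tokenize_object
-- ===== SOURCE A (Python) =====
-- def _tokenize_object(src: str) -> list[str]:
--     """
--     Tokenize a JavaScript object/array literal string.
--
--     :param src: The JS source snippet.
--     :return: A list of token strings.
--     """
--     toks = []
--     i, n = 0, len(src)
--     while i < n:
--         ch = src[i]
--
--         # Skip whitespace
--         if ch in " \t\r\n":
--             i += 1
--             continue
--
--         # String literal
--         if ch in ("'", '"'):
--             quote = ch
--             j = i + 1
--             esc = False
--             while j < n: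
--                 c = src[j]
--                 if esc:
--                     esc = False
--                 elif c == "\\":
--                     esc = True
--                 elif c == quote:
--                     j += 1
--                     break
--                 j += 1
--             toks.append(src[i:j])
--             i = j
--             continue
--
--         # Comment
--         if ch == "/" and i + 1 < n and src[i + 1] in "/*":
--             if src[i + 1] == "/":  # single line
--                 i += 2
--                 while i < n and src[i] not in "\r\n":
--                     i += 1
--             else:  # block comment
--                 i += 2
--                 while i + 1 < n and not (src[i] == "*" and src[i + 1] == "/"):
--                     i += 1
--                 i += 2
--             continue
--
--         # Punctuation
--         if ch in "{}[]:,":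
--             toks.append(ch)
--             i += 1
--             continue
--
--         # Identifier or number
--         j = i
--         while j < n and src[j] not in " \t\r\n{}[]:,":
--             j += 1
--         toks.append(src[i:j])
--         i = j
--
--     return toks
-- ===== SOURCE B (Python) =====
-- def _tokenize_object(src: str) -> list[str]:
--     """Tokenize a JavaScript object/array literal string (single-pass state machine)."""
--     WS = " \t\r\n"
--     PUNCT = "{}[]:,"
--     toks: list[str] = []
--     state = "default"  # default | str | ident | slash | line | block | block_star
--     quote = ""
--     esc = False
--     buf: list[str] = []
--     for c in src:
--         while True:
--             if state == "default":
--                 if c in WS: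
--                     pass
--                 elif c == "'" or c == '"':
--                     state, quote, esc, buf = "str", c, False, [c]
--                 elif c == "/":
--                     state = "slash"
--                 elif c in PUNCT:
--                     toks.append(c)
--                 else:
--                     state, buf = "ident", [c]
--             elif state == "str":
--                 buf.append(c)
--                 if esc:
--                     esc = False
--                 elif c == "\\":
--                     esc = True
--                 elif c == quote:
--                     toks.append("".join(buf))
--                     state = "default"
--             elif state == "ident":
--                 if c in WS or c in PUNCT:
--                     toks.append("".join(buf))
--                     state = "default"
--                     continue  # reprocess the delimiter in default state
--                 buf.append(c)
--             elif state == "slash":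
--                 if c == "/":
--                     state = "line"
--                 elif c == "*":
--                     state = "block"
--                 elif c in WS or c in PUNCT:
--                     toks.append("/")
--                     state = "default"
--                     continue  # reprocess the delimiter in default state
--                 else:
--                     state, buf = "ident", ["/", c]
--             elif state == "line":
--                 if c == "\r" or c == "\n":
--                     state = "default"
--             elif state == "block":
--                 if c == "*":
--                     state = "block_star"
--             else:  # block_star
--                 if c == "/":
--                     state = "default"
--                 elif c != "*":
--                     state = "block"
--             break
--     if state == "str" or state == "ident":
--         toks.append("".join(buf))
--     elif state == "slash":
--         toks.append("/")
--     return toks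
-- ===== Notes on version B (the rewrite author's own statement) =====
-- stated objective: alternative
-- what changed: Replaced the index-jumping scanner with nested inner while-loops and slicing by a single-pass character-at-a-time finite state machine (states default/string/ident/slash/line-comment/block-comment) that accumulates token buffers and flushes at end of input.
import Mathlib
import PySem

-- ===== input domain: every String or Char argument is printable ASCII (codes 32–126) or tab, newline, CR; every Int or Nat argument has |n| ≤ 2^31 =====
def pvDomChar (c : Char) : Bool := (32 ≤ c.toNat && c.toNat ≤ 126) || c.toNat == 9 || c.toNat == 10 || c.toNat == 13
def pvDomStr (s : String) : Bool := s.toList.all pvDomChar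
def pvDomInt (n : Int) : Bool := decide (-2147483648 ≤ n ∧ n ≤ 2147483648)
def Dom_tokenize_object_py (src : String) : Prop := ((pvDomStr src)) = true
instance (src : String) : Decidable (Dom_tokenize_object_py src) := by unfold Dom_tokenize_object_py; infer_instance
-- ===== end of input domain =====

-- B replaces A's index-jumping scanner (inner while-loops + slices) by a single-pass
-- character state machine; alternative decomposition, same cost, same return value.


-- shared character classes (the literal sets " \t\r\n" and "{}[]:," of both Pythons)
def pvIsWs (c : Char) : Bool := c = ' ' || c = '\t' || c = '\r' || c = '\n'
def pvIsPunct (c : Char) : Bool := c = '{' || c = '}' || c = '[' || c = ']' || c = ':' || c = ','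
def pvIsDelim (c : Char) : Bool := pvIsWs c || pvIsPunct c

-- ===== PORT A =====
-- A's inner string-literal while loop: returns (consumed chars after the opening
-- quote, remaining chars); on exhaustion the rest is [] (unterminated literal).
def pvStrLoop (q : Char) : Bool → List Char → List Char × List Char
  | _, [] => ([], [])
  | true, c :: cs => let p := pvStrLoop q false cs; (c :: p.1, p.2)
  | false, c :: cs =>
      if c = '\\' then let p := pvStrLoop q true cs; (c :: p.1, p.2)
      else if c = q then ([c], cs)
      else let p := pvStrLoop q false cs; (c :: p.1, p.2)

-- A's line-comment while loop: skip until '\r'/'\n' (left in place) or end.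
def pvLineLoop : List Char → List Char
  | [] => []
  | c :: cs => if c = '\r' ∨ c = '\n' then c :: cs else pvLineLoop cs

-- A's block-comment while loop (the final i += 2 skips "*/", or runs past the end).
def pvBlockLoop : List Char → List Char
  | [] => []
  | [_] => []
  | a :: b :: cs => if a = '*' ∧ b = '/' then cs else pvBlockLoop (b :: cs)

-- A's identifier/number while loop: returns (consumed chars, rest).
def pvIdentLoop : List Char → List Char × List Char
  | [] => ([], [])
  | c :: cs =>
      if pvIsDelim c then ([], c :: cs)
      else let p := pvIdentLoop cs; (c :: p.1, p.2)

theorem pvStrLoop_len (q : Char) : ∀ (esc : Bool) (cs : List Char),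
    (pvStrLoop q esc cs).2.length ≤ cs.length := by
  intro esc cs
  induction cs generalizing esc with
  | nil => cases esc <;> simp [pvStrLoop]
  | cons c cs ih =>
      cases esc <;> simp only [pvStrLoop] <;> [skip; exact (ih false).trans (by simp)]
      split_ifs with h1 h2
      · exact (ih true).trans (by simp)
      · simp
      · exact (ih false).trans (by simp)

theorem pvLineLoop_len : ∀ cs : List Char, (pvLineLoop cs).length ≤ cs.length := by
  intro cs
  induction cs with
  | nil => simp [pvLineLoop]
  | cons c cs ih => simp only [pvLineLoop]; split_ifs <;> simp <;> exact ih.trans (by simp)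

theorem pvBlockLoop_len : ∀ cs : List Char, (pvBlockLoop cs).length ≤ cs.length := by
  intro cs
  induction cs with
  | nil => simp [pvBlockLoop]
  | cons a cs ih =>
      match cs, ih with
      | [], _ => simp [pvBlockLoop]
      | b :: cs, ih =>
          simp only [pvBlockLoop]
          split_ifs
          · simp; omega
          · exact ih.trans (by simp)

theorem pvIdentLoop_len : ∀ cs : List Char, (pvIdentLoop cs).2.length ≤ cs.length := by
  intro cs
  induction cs with
  | nil => simp [pvIdentLoop]
  | cons c cs ih =>
      simp only [pvIdentLoop]
      split_ifs <;> simp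
      exact ih.trans (by simp)

-- A's main while loop, one step per token / skipped region.
def pvTokLoop : List Char → List String
  | [] => []
  | c :: cs =>
      if pvIsWs c then pvTokLoop cs
      else if c = '\'' ∨ c = '"' then
        let p := pvStrLoop c false cs
        String.mk (c :: p.1) :: pvTokLoop p.2
      else if c = '/' ∧ (cs.head? = some '/' ∨ cs.head? = some '*') then
        if cs.head? = some '/' then pvTokLoop (pvLineLoop cs.tail)
        else pvTokLoop (pvBlockLoop cs.tail)
      else if pvIsPunct c then String.mk [c] :: pvTokLoop cs
      else
        let p := pvIdentLoop cs
        String.mk (c :: p.1) :: pvTokLoop p.2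
termination_by l => l.length
decreasing_by
  · simp
  · exact Nat.lt_succ_of_le (pvStrLoop_len c false cs)
  · exact Nat.lt_succ_of_le ((pvLineLoop_len cs.tail).trans (by cases cs <;> simp))
  · exact Nat.lt_succ_of_le ((pvBlockLoop_len cs.tail).trans (by cases cs <;> simp))
  · simp
  · exact Nat.lt_succ_of_le (pvIdentLoop_len cs)

def tokenize_object_py (src : String) : List String := pvTokLoop src.toList

-- ===== PORT B =====
-- B's states: default | str(quote,esc,buf) | ident(buf) | slash | line | block(sawStar)
inductive PvSt where
  | default : PvSt
  | instr : Char → Bool → List Char → PvSt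
  | ident : List Char → PvSt
  | slash : PvSt
  | line : PvSt
  | block : Bool → PvSt
deriving DecidableEq, Repr

-- B's default-state branch (also reached via `continue` from ident/slash states).
def pvStepDefault (toks : List String) (c : Char) : List String × PvSt :=
  if pvIsWs c then (toks, .default)
  else if c = '\'' ∨ c = '"' then (toks, .instr c false [c])
  else if c = '/' then (toks, .slash)
  else if pvIsPunct c then (toks ++ [String.mk [c]], .default)
  else (toks, .ident [c])

def pvStep : List String × PvSt → Char → List String × PvSt
  | (toks, .default), c => pvStepDefault toks c
  | (toks, .instr q esc buf), c =>
      let buf := buf ++ [c]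
      if esc then (toks, .instr q false buf)
      else if c = '\\' then (toks, .instr q true buf)
      else if c = q then (toks ++ [String.mk buf], .default)
      else (toks, .instr q false buf)
  | (toks, .ident buf), c =>
      if pvIsWs c || pvIsPunct c then pvStepDefault (toks ++ [String.mk buf]) c
      else (toks, .ident (buf ++ [c]))
  | (toks, .slash), c =>
      if c = '/' then (toks, .line)
      else if c = '*' then (toks, .block false)
      else if pvIsWs c || pvIsPunct c then pvStepDefault (toks ++ ["/"]) c
      else (toks, .ident ['/', c])
  | (toks, .line), c => if c = '\r' ∨ c = '\n' then (toks, .default) else (toks, .line)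
  | (toks, .block star), c =>
      if star then
        if c = '/' then (toks, .default)
        else if c = '*' then (toks, .block true)
        else (toks, .block false)
      else if c = '*' then (toks, .block true) else (toks, .block false)

-- B's end-of-input flush.
def pvFlush : List String × PvSt → List String
  | (toks, .instr _ _ buf) => toks ++ [String.mk buf]
  | (toks, .ident buf) => toks ++ [String.mk buf]
  | (toks, .slash) => toks ++ ["/"]
  | (toks, _) => toks

def tokenize_object_py_alt (src : String) : List String :=
  pvFlush (src.toList.foldl pvStep ([], .default))

-- ===== PRECONDITION & SPEC =====
def Spec_tokenize_object_py (src : String) (out : List String) : Prop := out = tokenize_object_py_alt src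
instance (src : String) (out : List String) : Decidable (Spec_tokenize_object_py src out) := by unfold Spec_tokenize_object_py; infer_instance

-- ===== CLAIM (what is proved, stated in full; the proofs are below) =====
def Claim_equal_tokenize_object_py : Prop := ∀ (src : String), Dom_tokenize_object_py src → Spec_tokenize_object_py src (tokenize_object_py src)

-- ===== LEMMAS AND PROOFS =====

-- run the machine on cs from (toks, st) and flush
def pvRun (toks : List String) (st : PvSt) (cs : List Char) : List String :=
  pvFlush (cs.foldl pvStep (toks, st))

theorem pvRun_cons (toks : List String) (st : PvSt) (c : Char) (cs : List Char) :
    pvRun toks st (c :: cs) = pvRun (pvStep (toks, st) c).1 (pvStep (toks, st) c).2 cs := by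
  simp [pvRun]

theorem pvRun_instr (q : Char) : ∀ (cs : List Char) (esc : Bool) (buf : List Char) (toks : List String),
    pvRun toks (.instr q esc buf) cs =
      pvRun (toks ++ [String.mk (buf ++ (pvStrLoop q esc cs).1)]) .default (pvStrLoop q esc cs).2 := by
  intro cs
  induction cs with
  | nil => intro esc buf toks; cases esc <;> simp [pvRun, pvStrLoop, pvFlush]
  | cons c cs ih =>
      intro esc buf toks
      rw [pvRun_cons]
      cases esc with
      | true =>
          rw [show pvStep (toks, PvSt.instr q true buf) c = (toks, PvSt.instr q false (buf ++ [c]))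
                from by simp [pvStep]]
          rw [ih false (buf ++ [c]) toks]
          simp [pvStrLoop]
      | false =>
          by_cases hb : c = '\\'
          · rw [show pvStep (toks, PvSt.instr q false buf) c = (toks, PvSt.instr q true (buf ++ [c]))
                  from by simp [pvStep, hb]]
            rw [ih true (buf ++ [c]) toks]
            simp [pvStrLoop, hb]
          · by_cases hq : c = q
            · subst hq
              rw [show pvStep (toks, PvSt.instr c false buf) c
                    = (toks ++ [String.mk (buf ++ [c])], PvSt.default)
                  from by simp [pvStep, hb]]
              simp [pvStrLoop, hb]
            · rw [show pvStep (toks, PvSt.instr q false buf) c = (toks, PvSt.instr q false (buf ++ [c]))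
                    from by simp [pvStep, hb, hq]]
              rw [ih false (buf ++ [c]) toks]
              simp [pvStrLoop, hb, hq]

theorem pvRun_line : ∀ (cs : List Char) (toks : List String),
    pvRun toks .line cs = pvRun toks .default (pvLineLoop cs) := by
  intro cs
  induction cs with
  | nil => intro toks; simp [pvLineLoop, pvRun, pvFlush]
  | cons c cs ih =>
      intro toks
      rw [pvRun_cons]
      by_cases h : c = '\r' ∨ c = '\n'
      · have hw : pvIsWs c = true := by rcases h with h | h <;> simp [pvIsWs, h]
        rw [show pvStep (toks, PvSt.line) c = (toks, PvSt.default) from by simp [pvStep, h]]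
        rw [show pvLineLoop (c :: cs) = c :: cs from by simp [pvLineLoop, h]]
        rw [pvRun_cons,
            show pvStep (toks, PvSt.default) c = (toks, PvSt.default)
              from by simp [pvStep, pvStepDefault, hw]]
      · rw [show pvStep (toks, PvSt.line) c = (toks, PvSt.line) from by simp [pvStep, h]]
        rw [show pvLineLoop (c :: cs) = pvLineLoop cs from by simp [pvLineLoop, h]]
        exact ih toks

theorem pvBlockLoop_cons_ne {c : Char} (h : c ≠ '*') (cs : List Char) :
    pvBlockLoop (c :: cs) = pvBlockLoop cs := by
  cases cs <;> simp [pvBlockLoop, h]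

theorem pvRun_block : ∀ (cs : List Char) (toks : List String),
    (pvRun toks (.block false) cs = pvRun toks .default (pvBlockLoop cs)) ∧
    (pvRun toks (.block true) cs = pvRun toks .default (pvBlockLoop ('*' :: cs))) := by
  intro cs
  induction cs with
  | nil => intro toks; constructor <;> simp [pvBlockLoop, pvRun, pvFlush]
  | cons c cs ih =>
      intro toks
      constructor
      · rw [pvRun_cons]
        by_cases hs : c = '*'
        · rw [show pvStep (toks, PvSt.block false) c = (toks, PvSt.block true)
                from by simp [pvStep, hs]]
          rw [(ih toks).2, hs]
        · rw [show pvStep (toks, PvSt.block false) c = (toks, PvSt.block false)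
                from by simp [pvStep, hs]]
          rw [(ih toks).1, pvBlockLoop_cons_ne hs]
      · rw [pvRun_cons]
        by_cases hsl : c = '/'
        · rw [show pvStep (toks, PvSt.block true) c = (toks, PvSt.default)
                from by simp [pvStep, hsl]]
          rw [show pvBlockLoop ('*' :: c :: cs) = cs from by simp [pvBlockLoop, hsl]]
        · by_cases hs : c = '*'
          · rw [show pvStep (toks, PvSt.block true) c = (toks, PvSt.block true)
                  from by simp [pvStep, hs]]
            rw [(ih toks).2]
            rw [show pvBlockLoop ('*' :: c :: cs) = pvBlockLoop ('*' :: cs)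
                  from by simp [pvBlockLoop, hs]]
          · rw [show pvStep (toks, PvSt.block true) c = (toks, PvSt.block false)
                  from by simp [pvStep, hsl, hs]]
            rw [(ih toks).1]
            rw [show pvBlockLoop ('*' :: c :: cs) = pvBlockLoop (c :: cs)
                  from by simp [pvBlockLoop, hsl]]
            rw [pvBlockLoop_cons_ne hs]

theorem pvRun_ident : ∀ (cs : List Char) (buf : List Char) (toks : List String),
    pvRun toks (.ident buf) cs =
      pvRun (toks ++ [String.mk (buf ++ (pvIdentLoop cs).1)]) .default (pvIdentLoop cs).2 := by
  intro cs
  induction cs with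
  | nil => intro buf toks; simp [pvRun, pvIdentLoop, pvFlush]
  | cons c cs ih =>
      intro buf toks
      rw [pvRun_cons]
      by_cases hd : pvIsDelim c = true
      · rw [show pvStep (toks, PvSt.ident buf) c = pvStepDefault (toks ++ [String.mk buf]) c
              from by simp only [pvStep, pvIsDelim] at hd ⊢; rw [if_pos hd]]
        rw [show pvIdentLoop (c :: cs) = ([], c :: cs) from by simp [pvIdentLoop, hd]]
        rw [pvRun_cons]
        simp [pvStep]
      · have hd' : (pvIsWs c || pvIsPunct c) = false := by simpa [pvIsDelim] using hd
        rw [show pvStep (toks, PvSt.ident buf) c = (toks, PvSt.ident (buf ++ [c]))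
              from by simp only [pvStep]; rw [hd']; simp]
        rw [ih (buf ++ [c]) toks]
        simp [pvIdentLoop, hd]

theorem pvRun_default : ∀ (n : ℕ) (cs : List Char), cs.length ≤ n → ∀ (toks : List String),
    pvRun toks .default cs = toks ++ pvTokLoop cs := by
  intro n
  induction n with
  | zero =>
      intro cs h toks
      have : cs = [] := List.eq_nil_of_length_eq_zero (Nat.le_zero.mp h)
      subst this; simp [pvRun, pvTokLoop, pvFlush]
  | succ n ih =>
      intro cs h toks
      match cs with
      | [] => simp [pvRun, pvTokLoop, pvFlush]
      | c :: cs =>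
        have hlen : cs.length ≤ n := by simpa using h
        rw [pvRun_cons, pvTokLoop]
        by_cases hw : pvIsWs c = true
        · rw [show pvStep (toks, PvSt.default) c = (toks, PvSt.default)
                from by simp [pvStep, pvStepDefault, hw]]
          rw [if_pos hw]
          exact ih cs hlen toks
        · by_cases hq : c = '\'' ∨ c = '"'
          · rw [show pvStep (toks, PvSt.default) c = (toks, PvSt.instr c false [c])
                  from by simp [pvStep, pvStepDefault, hw, hq]]
            rw [if_neg hw, if_pos hq]
            rw [pvRun_instr]
            rw [ih _ ((pvStrLoop_len c false cs).trans hlen) _]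
            simp
          · by_cases hsl : c = '/'
            · subst hsl
              rw [show pvStep (toks, PvSt.default) '/' = (toks, PvSt.slash)
                    from by simp [pvStep, pvStepDefault, hw]]
              rw [if_neg hw, if_neg hq]
              match cs, hlen with
              | [], _ =>
                  simp [pvRun, pvFlush, pvTokLoop, pvIdentLoop]
                  rfl
              | d :: cs, hlen =>
                have hlen' : cs.length ≤ n := by simp at hlen; omega
                rw [pvRun_cons]
                by_cases hd1 : d = '/'
                · rw [show pvStep (toks, PvSt.slash) d = (toks, PvSt.line)
                        from by simp [pvStep, hd1]]
                  rw [if_pos ⟨rfl, by simp [hd1]⟩, if_pos (by simp [hd1])]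
                  rw [pvRun_line, ih _ ((pvLineLoop_len cs).trans hlen') _]
                  simp
                · by_cases hd2 : d = '*'
                  · rw [show pvStep (toks, PvSt.slash) d = (toks, PvSt.block false)
                          from by simp [pvStep, hd2]]
                    rw [if_pos ⟨rfl, by simp [hd2]⟩, if_neg (by simp [hd1])]
                    rw [(pvRun_block cs _).1,
                        ih _ ((pvBlockLoop_len cs).trans hlen') _]
                    simp
                  · rw [if_neg (by simp [hd1, hd2]), if_neg (by decide)]
                    by_cases hdd : pvIsDelim d = true
                    · have hdd' : (pvIsWs d || pvIsPunct d) = true := hdd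
                      rw [show pvStep (toks, PvSt.slash) d = pvStepDefault (toks ++ ["/"]) d
                            from by simp only [pvStep]; rw [if_neg hd1, if_neg hd2, if_pos hdd']]
                      rw [show pvIdentLoop (d :: cs) = ([], d :: cs)
                            from by simp [pvIdentLoop, hdd]]
                      have := ih (d :: cs) hlen (toks ++ [String.mk ['/']])
                      rw [pvRun_cons] at this
                      rw [show pvStep (toks ++ [String.mk ['/']], PvSt.default) d
                            = pvStepDefault (toks ++ [String.mk ['/']]) d from rfl] at this
                      rw [show (String.mk ['/'] : String) = "/" from rfl] at this
                      rw [this]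
                      simp
                      rfl
                    · have hdd' : (pvIsWs d || pvIsPunct d) = false := by
                        simpa [pvIsDelim] using hdd
                      rw [show pvStep (toks, PvSt.slash) d = (toks, PvSt.ident ['/', d])
                            from by simp only [pvStep]; rw [if_neg hd1, if_neg hd2, hdd']; simp]
                      rw [pvRun_ident, ih _ ((pvIdentLoop_len cs).trans hlen') _]
                      rw [show pvIdentLoop (d :: cs)
                            = ((d :: (pvIdentLoop cs).1 : List Char), (pvIdentLoop cs).2)
                            from by simp [pvIdentLoop, hdd]]
                      simp
            · by_cases hp : pvIsPunct c = true
              · rw [show pvStep (toks, PvSt.default) c = (toks ++ [String.mk [c]], PvSt.default)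
                      from by simp [pvStep, pvStepDefault, hw, hq, hsl, hp]]
                rw [if_neg hw, if_neg hq, if_neg (fun hc => hsl hc.1), if_pos hp]
                rw [ih cs hlen _]
                simp
              · have hdd : pvIsDelim c = false := by
                  simp [pvIsDelim, hp] at *
                  simpa using hw
                rw [show pvStep (toks, PvSt.default) c = (toks, PvSt.ident [c])
                      from by simp [pvStep, pvStepDefault, hw, hq, hsl, hp]]
                rw [if_neg hw, if_neg hq, if_neg (fun hc => hsl hc.1), if_neg hp]
                rw [pvRun_ident, ih _ ((pvIdentLoop_len cs).trans hlen) _]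
                simp

-- ===== VERDICT (by name: the statement is the Claim_ definition above) =====
theorem tokenize_object_py_spec : Claim_equal_tokenize_object_py := by
  intro src _
  unfold Spec_tokenize_object_py tokenize_object_py tokenize_object_py_alt
  have h := pvRun_default src.toList.length src.toList le_rfl []
  simpa [pvRun] using h.symm
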